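-- pv_equiv track=rewrite | github.com/android-scan/scanner | onnx_comp.py | strip_known_prefixes
-- ===== SOURCE A (Python) =====
-- def strip_known_prefixes(key: str) -> str:
--     changed = True
--     while changed:
--         changed = False
--         for prefix in ("module.", "model."):
--             if key.startswith(prefix):
--                 key = key[len(prefix):]
--                 changed = True
--     return key
-- ===== SOURCE B (Python) =====
-- def strip_known_prefixes(key: str) -> str:
--     # Advance an index over the leading run of known prefixes, slice once at the end.
--     i = 0
--     while True:
--         if key.startswith("module.", i):
--             i += 7
--         elif key.startswith("model.", i):
--             i += 6
--         else:
--             return key[i:]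
-- ===== Notes on version B (the rewrite author's own statement) =====
-- stated objective: alternative
-- what changed: Instead of repeatedly re-slicing the string under a while/changed flag, B advances a single index over the leading run of known prefixes and slices once at the end.
import Mathlib
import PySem

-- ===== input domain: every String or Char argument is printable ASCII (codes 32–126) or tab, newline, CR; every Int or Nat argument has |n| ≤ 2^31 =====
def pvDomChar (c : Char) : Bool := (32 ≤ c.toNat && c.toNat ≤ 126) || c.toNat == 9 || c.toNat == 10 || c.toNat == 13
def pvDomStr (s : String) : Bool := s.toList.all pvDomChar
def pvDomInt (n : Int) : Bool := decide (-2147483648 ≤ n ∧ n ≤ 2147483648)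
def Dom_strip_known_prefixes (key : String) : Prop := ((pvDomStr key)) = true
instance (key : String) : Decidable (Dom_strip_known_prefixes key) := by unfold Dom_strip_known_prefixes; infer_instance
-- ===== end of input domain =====

-- B replaces A's repeated strip-and-restart slicing with a single advancing index and one final slice; return values proved equal on all inputs.

-- ===== PORT A =====
-- one execution of A's for-loop body (the while-iteration): try "module." then "model.", carrying the `changed` flag
def stripA_pass (l : List Char) : List Char × Bool :=
  let p := if PySem.Chars.startswith l "module.".toList then (l.drop 7, true) else (l, false)
  if PySem.Chars.startswith p.1 "model.".toList then (p.1.drop 6, true) else p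

-- a successful startswith bounds the length (used for termination of both ports)
theorem pv_len {l p : List Char} (h : PySem.Chars.startswith l p = true) : p.length ≤ l.length :=
  ((PySem.Chars.startswith_iff _ _).mp h).length_le

-- a changing pass strictly shrinks the key (termination of A's while loop)
theorem stripA_pass_lt (l : List Char) (h : (stripA_pass l).2 = true) :
    (stripA_pass l).1.length < l.length := by
  simp only [stripA_pass] at h ⊢
  split_ifs at h ⊢ with h1 h2 h3 <;> simp_all <;>
    [ (have e1 := pv_len h1; have e2 := pv_len h2; simp at e1 e2; omega);
      (have e1 := pv_len h1; simp at e1; omega);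
      (have e1 := pv_len h3; simp at e1; omega) ]

-- A's while loop
def stripA_go (l : List Char) : List Char :=
  if h : (stripA_pass l).2 = true then stripA_go (stripA_pass l).1 else l
termination_by l.length
decreasing_by exact stripA_pass_lt l h

def strip_known_prefixes (key : String) : String := String.ofList (stripA_go key.toList)

-- ===== PORT B =====
-- Source B's loop: advance index i over the leading run of prefixes; key.startswith(p, i) is startswith on the drop
def stripB_go (l : List Char) (i : Nat) : Nat :=
  if PySem.Chars.startswith (l.drop i) "module.".toList then stripB_go l (i + 7)
  else if PySem.Chars.startswith (l.drop i) "model.".toList then stripB_go l (i + 6)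
  else i
termination_by l.length - i
decreasing_by
  all_goals rename_i h
  all_goals (have := pv_len h; simp at this; omega)

def strip_known_prefixes_alt (key : String) : String :=
  String.ofList (key.toList.drop (stripB_go key.toList 0))

-- ===== PRECONDITION & SPEC =====
def Spec_strip_known_prefixes (key : String) (out : String) : Prop := out = strip_known_prefixes_alt key
instance (key : String) (out : String) : Decidable (Spec_strip_known_prefixes key out) := by unfold Spec_strip_known_prefixes; infer_instance

-- ===== CLAIM (what is proved, stated in full; the proofs are below) =====
def Claim_equal_strip_known_prefixes : Prop := ∀ (key : String), Dom_strip_known_prefixes key → Spec_strip_known_prefixes key (strip_known_prefixes key)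

-- ===== LEMMAS AND PROOFS =====

-- no string starts with both prefixes (they differ at index 3)
theorem pv_disjoint (l : List Char)
    (h1 : PySem.Chars.startswith l "model.".toList = true)
    (h2 : PySem.Chars.startswith l "module.".toList = true) : False := by
  rw [PySem.Chars.startswith_iff] at h1 h2
  rcases List.prefix_or_prefix_of_prefix h1 h2 with h | h <;> revert h <;> decide

theorem pv_sw_nil_module : PySem.Chars.startswith ([] : List Char) ['m','o','d','u','l','e','.'] = false := by decide
theorem pv_sw_nil_model : PySem.Chars.startswith ([] : List Char) ['m','o','d','e','l','.'] = false := by decide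

-- the four shapes of one pass of A
theorem pass_tt (l : List Char) (h1 : PySem.Chars.startswith l "module.".toList = true)
    (h2 : PySem.Chars.startswith (l.drop 7) "model.".toList = true) :
    stripA_pass l = ((l.drop 7).drop 6, true) := by simp_all [stripA_pass]
theorem pass_tf (l : List Char) (h1 : PySem.Chars.startswith l "module.".toList = true)
    (h2 : PySem.Chars.startswith (l.drop 7) "model.".toList = false) :
    stripA_pass l = (l.drop 7, true) := by simp_all [stripA_pass]
theorem pass_ft (l : List Char) (h1 : PySem.Chars.startswith l "module.".toList = false)
    (h2 : PySem.Chars.startswith l "model.".toList = true) :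
    stripA_pass l = (l.drop 6, true) := by simp_all [stripA_pass]
theorem pass_ff (l : List Char) (h1 : PySem.Chars.startswith l "module.".toList = false)
    (h2 : PySem.Chars.startswith l "model.".toList = false) :
    stripA_pass l = (l, false) := by simp_all [stripA_pass]

-- shifting B's index is dropping from the list
theorem pv_shift (n : Nat) : ∀ (l : List Char) (i : Nat), l.length - i ≤ n →
    stripB_go l i = i + stripB_go (l.drop i) 0 := by
  induction n with
  | zero =>
    intro l i hle
    have hnil : l.drop i = [] := List.eq_nil_of_length_eq_zero (by simp; omega)
    rw [stripB_go]
    conv_rhs => rw [stripB_go]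
    simp [hnil, pv_sw_nil_module, pv_sw_nil_model]
  | succ n ih =>
    intro l i hle
    rw [stripB_go]
    conv_rhs => rw [stripB_go]
    simp only [List.drop_zero]
    by_cases h1 : PySem.Chars.startswith (l.drop i) "module.".toList = true
    · have hlen := pv_len h1; simp at hlen
      rw [if_pos h1, if_pos h1, ih l (i + 7) (by omega),
          ih (l.drop i) (0 + 7) (by simp; omega)]
      simp [List.drop_drop]
      omega
    · rw [if_neg h1, if_neg h1]
      by_cases h2 : PySem.Chars.startswith (l.drop i) "model.".toList = true
      · have hlen := pv_len h2; simp at hlen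
        rw [if_pos h2, if_pos h2, ih l (i + 6) (by omega),
            ih (l.drop i) (0 + 6) (by simp; omega)]
        simp [List.drop_drop]
        omega
      · rw [if_neg h2, if_neg h2]
        omega

theorem pv_main (n : Nat) : ∀ (l : List Char), l.length ≤ n →
    stripA_go l = l.drop (stripB_go l 0) := by
  induction n with
  | zero =>
    intro l hle
    have hnil : l = [] := List.eq_nil_of_length_eq_zero (by omega)
    subst hnil
    rw [stripA_go, stripB_go]
    simp [pass_ff [] (by decide) (by decide), pv_sw_nil_module, pv_sw_nil_model]
  | succ n ih =>
    intro l hle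
    rw [stripA_go]
    conv_rhs => rw [stripB_go]
    simp only [List.drop_zero]
    by_cases h1 : PySem.Chars.startswith l "module.".toList = true
    · have hlen1 := pv_len h1; simp at hlen1
      rw [if_pos h1, pv_shift l.length l 7 (by omega)]
      by_cases h2 : PySem.Chars.startswith (l.drop 7) "model.".toList = true
      · have hlen2 := pv_len h2; simp at hlen2
        simp only [pass_tt l h1 h2]
        rw [dif_pos trivial, ih ((l.drop 7).drop 6) (by simp; omega)]
        conv_rhs => rw [stripB_go]
        simp only [List.drop_zero]
        rw [if_neg (fun hmod => pv_disjoint (l.drop 7) h2 hmod), if_pos h2,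
            pv_shift l.length (l.drop 7) 6 (by simp; omega)]
        simp only [List.drop_drop]
        congr 1 <;> omega
      · have h2' : PySem.Chars.startswith (l.drop 7) "model.".toList = false := by
          simpa using h2
        simp only [pass_tf l h1 h2']
        rw [dif_pos trivial, ih (l.drop 7) (by simp; omega)]
        simp only [List.drop_drop]
    · have h1' : PySem.Chars.startswith l "module.".toList = false := by simpa using h1
      rw [if_neg h1]
      by_cases h2 : PySem.Chars.startswith l "model.".toList = true
      · have hlen2 := pv_len h2; simp at hlen2
        rw [if_pos h2, pv_shift l.length l 6 (by omega)]
        simp only [pass_ft l h1' h2]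
        rw [dif_pos trivial, ih (l.drop 6) (by simp; omega)]
        simp only [List.drop_drop]
      · have h2' : PySem.Chars.startswith l "model.".toList = false := by simpa using h2
        rw [if_neg h2]
        simp [pass_ff l h1' h2']

-- ===== VERDICT (by name: the statement is the Claim_ definition above) =====
theorem strip_known_prefixes_spec : Claim_equal_strip_known_prefixes := by
  intro key _
  unfold Spec_strip_known_prefixes strip_known_prefixes strip_known_prefixes_alt
  rw [pv_main key.toList.length key.toList (le_refl _)]
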